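-- pv_equiv track=rewrite | github.com/asalvaz/python | Amazon/FuncionesT1.py | intentodecremental
-- ===== SOURCE A (Python) =====
-- def intentodecremental(list, n):
--     secuencia = []
--
--     for i in range(len(list)):
--         for j in range(len(list)):
--             if i != j:
--                 if list[i]-1 == list[j]:
--                     secuencia.append(list[i])
--                     secuencia.append(list[j])
--     return secuencia
-- ===== SOURCE B (Python) =====
-- def intentodecremental(list, n):
--     counts = {}
--     for x in list:
--         counts[x] = counts.get(x, 0) + 1
--     secuencia = []
--     for x in list:
--         secuencia += [x, x - 1] * counts.get(x - 1, 0)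
--     return secuencia
-- ===== Notes on version B (the rewrite author's own statement) =====
-- stated objective: faster
-- what changed: Replaces the double index scan with a counter dict built in one pass, then a single pass emitting [x, x-1]*count[x-1] per element (the i != j guard is vacuous since x-1 never equals x).
import Mathlib
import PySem

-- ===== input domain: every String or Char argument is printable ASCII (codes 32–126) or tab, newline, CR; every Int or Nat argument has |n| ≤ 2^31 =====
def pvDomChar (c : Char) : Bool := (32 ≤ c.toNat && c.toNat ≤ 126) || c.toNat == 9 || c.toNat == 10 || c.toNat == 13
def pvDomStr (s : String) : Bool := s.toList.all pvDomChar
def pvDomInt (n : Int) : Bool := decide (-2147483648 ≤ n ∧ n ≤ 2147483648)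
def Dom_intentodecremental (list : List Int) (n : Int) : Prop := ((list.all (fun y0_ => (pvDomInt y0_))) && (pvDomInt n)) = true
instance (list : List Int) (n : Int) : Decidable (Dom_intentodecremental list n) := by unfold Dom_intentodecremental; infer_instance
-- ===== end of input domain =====

-- B replaces A's quadratic double index scan by a counter built once plus one pass emitting
-- [x, x-1] * count(x-1) per element (the i ≠ j guard is vacuous since x-1 ≠ x): O(n + output).

-- ===== PORT A =====
def intentodecremental (list : List Int) (n : Int) : List Int :=
  (PySem.List.pyRange 0 (list.length : Int) 1).foldl (fun secuencia i =>
    (PySem.List.pyRange 0 (list.length : Int) 1).foldl (fun secuencia j =>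
      if i ≠ j then
        if PySem.List.pyGetD list i 0 - 1 = PySem.List.pyGetD list j 0 then
          secuencia ++ [PySem.List.pyGetD list i 0] ++ [PySem.List.pyGetD list j 0]
        else secuencia
      else secuencia) secuencia) []

-- ===== PORT B =====
def intentodecremental_alt (list : List Int) (n : Int) : List Int :=
  let counts : PySem.Dict Int Int :=
    list.foldl (fun d x => d.insert x (d.getD x 0 + 1)) PySem.Dict.empty
  list.foldl (fun secuencia x =>
    secuencia ++ (List.replicate (counts.getD (x - 1) 0).toNat [x, x - 1]).flatten) []

-- ===== PRECONDITION & SPEC =====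
def Spec_intentodecremental (list : List Int) (n : Int) (out : List Int) : Prop := out = intentodecremental_alt list n
instance (list : List Int) (n : Int) (out : List Int) : Decidable (Spec_intentodecremental list n out) := by unfold Spec_intentodecremental; infer_instance

-- ===== CLAIM (what is proved, stated in full; the proofs are below) =====
def Claim_equal_intentodecremental : Prop := ∀ (list : List Int) (n : Int), Dom_intentodecremental list n → Spec_intentodecremental list n (intentodecremental list n)

-- ===== LEMMAS AND PROOFS =====

-- A's inner scan over the whole list, for a fixed outer value x, appends exactly
-- count(x-1) copies of [x, x-1].
theorem pv_inner_scan (x : Int) (xs : List Int) (acc : List Int) :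
    xs.foldl (fun acc y => if x - 1 = y then acc ++ [x] ++ [y] else acc) acc
      = acc ++ (List.replicate (xs.count (x - 1)) [x, x - 1]).flatten := by
  induction xs generalizing acc with
  | nil => simp
  | cons y ys ih =>
    rw [List.foldl_cons]
    by_cases h : x - 1 = y
    · subst h
      rw [if_pos rfl, ih]
      simp [List.replicate_succ]
    · rw [if_neg h, ih]
      simp [Ne.symm h]

-- Both programs equal the same canonical single pass over the values.
theorem pv_A_canon (list : List Int) (n : Int) :
    intentodecremental list n
      = list.foldl (fun acc x =>
          acc ++ (List.replicate (list.count (x - 1)) [x, x - 1]).flatten) [] := by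
  unfold intentodecremental
  have houter :
      (fun (secuencia : List Int) (i : Int) =>
        (PySem.List.pyRange 0 (list.length : Int) 1).foldl (fun secuencia j =>
          if i ≠ j then
            if PySem.List.pyGetD list i 0 - 1 = PySem.List.pyGetD list j 0 then
              secuencia ++ [PySem.List.pyGetD list i 0] ++ [PySem.List.pyGetD list j 0]
            else secuencia
          else secuencia) secuencia)
      = (fun (secuencia : List Int) (i : Int) =>
          (fun acc x =>
            acc ++ (List.replicate (list.count (x - 1)) [x, x - 1]).flatten)
            secuencia (PySem.List.pyGetD list i 0)) := by
    funext secuencia i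
    have hinner :
        (fun (acc : List Int) (j : Int) =>
          if i ≠ j then
            if PySem.List.pyGetD list i 0 - 1 = PySem.List.pyGetD list j 0 then
              acc ++ [PySem.List.pyGetD list i 0] ++ [PySem.List.pyGetD list j 0]
            else acc
          else acc)
        = (fun (acc : List Int) (j : Int) =>
            (fun acc y => if PySem.List.pyGetD list i 0 - 1 = y then
              acc ++ [PySem.List.pyGetD list i 0] ++ [y] else acc)
            acc (PySem.List.pyGetD list j 0)) := by
      funext acc j
      by_cases hij : i = j
      · subst hij
        simp only [ne_eq, not_true_eq_false, if_false]
        have : ¬ (PySem.List.pyGetD list i 0 - 1 = PySem.List.pyGetD list i 0) := by omega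
        simp [this]
      · simp [hij]
    rw [hinner, PySem.List.foldl_pyRange_zero_pyGetD' list 0
      (fun acc y => if PySem.List.pyGetD list i 0 - 1 = y then
        acc ++ [PySem.List.pyGetD list i 0] ++ [y] else acc) secuencia,
      pv_inner_scan]
  rw [houter, PySem.List.foldl_pyRange_zero_pyGetD' list 0
    (fun acc x => acc ++ (List.replicate (list.count (x - 1)) [x, x - 1]).flatten) []]

theorem pv_B_canon (list : List Int) (n : Int) :
    intentodecremental_alt list n
      = list.foldl (fun acc x =>
          acc ++ (List.replicate (list.count (x - 1)) [x, x - 1]).flatten) [] := by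
  unfold intentodecremental_alt
  apply PySem.List.foldl_congr_mem
  intro acc x _
  rw [PySem.Dict.getD_foldl_insert_add_one]
  simp

-- ===== VERDICT (by name: the statement is the Claim_ definition above) =====
theorem intentodecremental_spec : Claim_equal_intentodecremental := by
  intro list n _
  unfold Spec_intentodecremental
  rw [pv_A_canon list n, pv_B_canon list n]
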